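-- pv_equiv track=rewrite | github.com/cryoem/eman2 | sphire/legacy/unused/libpy/sphire_libpy_unused/utilities.py | split_chunks_bad
-- ===== SOURCE A (Python) =====
-- def split_chunks_bad(l, n):
-- 	"""
-- 	   Splits list l into n chunks with approximately equals sum of values
-- 	   see  http://stackoverflow.com/questions/6855394/splitting-list-in-chunks-of-balanced-weight
-- 	"""
-- 	result = [[] for i in range(n)]
-- 	sums   = {i:0 for i in range(n)}
-- 	c = 0
-- 	for e in l:
-- 		for i in sums:
-- 			if c == sums[i]:
-- 				result[i].append(e)
-- 				break
-- 		sums[i] += e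
-- 		c = min(sums.values())
-- 	for i in range(len(result)):
-- 		result[i].sort()
-- 	return result
-- ===== SOURCE B (Python) =====
-- def _insert_sorted(pq, item):
-- 	# insert item into a (sum, index)-sorted list, keeping it sorted
-- 	k = 0
-- 	while k < len(pq) and pq[k] < item:
-- 		k += 1
-- 	return pq[:k] + [item] + pq[k:]
--
--
-- def split_chunks_bad(l, n):
-- 	"""
-- 	   Splits list l into n chunks with approximately equals sum of values,
-- 	   using a priority queue of buckets ordered by (current sum, bucket index).
-- 	"""
-- 	buckets = [[] for _ in range(n)]
-- 	pq = [(0, i) for i in range(n)]  # sorted by (sum, index)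
-- 	for e in l:
-- 		s, i = pq[0]
-- 		pq = _insert_sorted(pq[1:], (s + e, i))
-- 		buckets[i].append(e)
-- 	for b in buckets:
-- 		b.sort()
-- 	return buckets
-- ===== Notes on version B (the rewrite author's own statement) =====
-- stated objective: alternative
-- what changed: Replaces A's per-element rescan of the sums dict plus min(sums.values()) with a priority queue: a list of (sum, index) pairs kept sorted, popping the head for the least-loaded bucket and re-inserting it in sorted position.
import Mathlib
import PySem

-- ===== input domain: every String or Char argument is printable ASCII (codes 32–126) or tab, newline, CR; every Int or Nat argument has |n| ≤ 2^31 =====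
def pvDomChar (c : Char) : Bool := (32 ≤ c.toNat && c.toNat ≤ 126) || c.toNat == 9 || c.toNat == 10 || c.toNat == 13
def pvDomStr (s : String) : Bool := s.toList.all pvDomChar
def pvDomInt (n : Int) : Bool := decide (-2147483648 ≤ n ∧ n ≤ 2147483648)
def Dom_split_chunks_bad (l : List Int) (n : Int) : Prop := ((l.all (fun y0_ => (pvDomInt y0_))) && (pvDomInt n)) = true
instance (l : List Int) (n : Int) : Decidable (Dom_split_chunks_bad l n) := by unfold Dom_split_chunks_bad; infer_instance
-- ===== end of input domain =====

-- B replaces A's per-element rescan of the sums dict (plus min(sums.values())) by a priority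
-- queue: a (sum, index)-sorted list whose head is the least-loaded bucket ("alternative").
-- A mutates nothing observable by the caller; equivalence is about the return value.

-- ===== PORT A =====
-- one iteration of 'for e in l' in A: state = (result, sums, c)
def pvStepA (st : List (List Int) × PySem.Dict Int Int × Int) (e : Int) :
    List (List Int) × PySem.Dict Int Int × Int :=
  -- for i in sums: if c == sums[i]: result[i].append(e); break
  match st.2.1.items.find? (fun kv => st.2.2 == kv.2) with
  | none => st      -- only when sums is empty (n ≤ 0): Python raises NameError (outside Pre_)
  | some (i, _) =>
    -- i is a dict key produced by range(n), hence a valid non-negative index into result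
    let result := st.1.set i.toNat ((st.1.getD i.toNat []) ++ [e])
    let sums := st.2.1.modify i 0 (· + e)          -- sums[i] += e
    let c := match PySem.List.min? sums.values (fun x => x) with
             | some m => m
             | none => st.2.2                      -- unreachable: sums is non-empty here
    (result, sums, c)

def split_chunks_bad (l : List Int) (n : Int) : List (List Int) :=
  let result : List (List Int) := (PySem.List.pyRange 0 n 1).map (fun _ => [])
  let sums : PySem.Dict Int Int :=
    (PySem.List.pyRange 0 n 1).foldl (fun d i => d.insert i 0) PySem.Dict.empty
  let st := l.foldl pvStepA (result, sums, 0)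
  -- for i in range(len(result)): result[i].sort()
  (PySem.List.pyRange 0 (st.1.length : Int) 1).foldl
    (fun r i => r.set i.toNat (PySem.List.sorted (r.getD i.toNat []) (fun x => x) false)) st.1

-- ===== PORT B =====
-- Python tuple comparison (s, i) < (t, j) on pairs of ints
def pvPairLtb (a b : Int × Int) : Bool := a.1 < b.1 || (a.1 == b.1 && a.2 < b.2)

-- _insert_sorted's while loop: first position k with not (pq[k] < item)
def pvInsPos (pq : List (Int × Int)) (item : Int × Int) : Nat :=
  match pq with
  | [] => 0
  | x :: rest => if pvPairLtb x item then pvInsPos rest item + 1 else 0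

-- _insert_sorted(pq, item) = pq[:k] + [item] + pq[k:]
def pvInsertSorted (pq : List (Int × Int)) (item : Int × Int) : List (Int × Int) :=
  pq.take (pvInsPos pq item) ++ [item] ++ pq.drop (pvInsPos pq item)

-- one iteration of 'for e in l' in B: state = (buckets, pq)
def pvStepB (st : List (List Int) × List (Int × Int)) (e : Int) :
    List (List Int) × List (Int × Int) :=
  match st.2 with
  | [] => st        -- only when n ≤ 0: Python raises IndexError on pq[0] (outside Pre_)
  | (s, i) :: rest =>
    (st.1.set i.toNat ((st.1.getD i.toNat []) ++ [e]), pvInsertSorted rest (s + e, i))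

def split_chunks_bad_alt (l : List Int) (n : Int) : List (List Int) :=
  let buckets : List (List Int) := (PySem.List.pyRange 0 n 1).map (fun _ => [])
  let pq : List (Int × Int) := (PySem.List.pyRange 0 n 1).map (fun i => ((0 : Int), i))
  let st := l.foldl pvStepB (buckets, pq)
  st.1.map (fun b => PySem.List.sorted b (fun x => x) false)

-- ===== PRECONDITION & SPEC =====
-- Pre_ excludes only inputs on which A raises: a non-empty l with n ≤ 0 makes A's inner
-- 'for i in sums' loop leave i unbound (NameError).
def Pre_split_chunks_bad (l : List Int) (n : Int) : Prop := l = [] ∨ 1 ≤ n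
instance (l : List Int) (n : Int) : Decidable (Pre_split_chunks_bad l n) := by
  unfold Pre_split_chunks_bad; infer_instance

def pvWitness_split_chunks_bad : List Int × Int := ([3, 1, 2, 5], 2)

def Spec_split_chunks_bad (l : List Int) (n : Int) (out : List (List Int)) : Prop :=
  out = split_chunks_bad_alt l n
instance (l : List Int) (n : Int) (out : List (List Int)) : Decidable (Spec_split_chunks_bad l n out) := by
  unfold Spec_split_chunks_bad; infer_instance

-- ===== CLAIM (what is proved, stated in full; the proofs are below) =====
def Claim_equal_split_chunks_bad : Prop := ∀ (l : List Int) (n : Int), Dom_split_chunks_bad l n → Pre_split_chunks_bad l n → Spec_split_chunks_bad l n (split_chunks_bad l n)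

-- ===== LEMMAS AND PROOFS =====

-- the coupling invariant between A's loop state and B's loop state
def pvInv (stA : List (List Int) × PySem.Dict Int Int × Int)
    (stB : List (List Int) × List (Int × Int)) : Prop :=
  stA.1 = stB.1 ∧
  (stA.2.1.items.map Prod.fst).Pairwise (· < ·) ∧
  stA.2.1.items ≠ [] ∧
  stB.2.Perm (stA.2.1.items.map (fun kv => (kv.2, kv.1))) ∧
  stB.2.Pairwise (fun a b => pvPairLtb a b = true) ∧
  (∀ kv ∈ stA.2.1.items, stA.2.2 ≤ kv.2) ∧
  (∃ kv ∈ stA.2.1.items, kv.2 = stA.2.2)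

lemma pvInsertSorted_cons (x : Int × Int) (rest : List (Int × Int)) (item : Int × Int) :
    pvInsertSorted (x :: rest) item =
      if pvPairLtb x item then x :: pvInsertSorted rest item else item :: x :: rest := by
  by_cases h : pvPairLtb x item = true <;>
    simp [pvInsertSorted, pvInsPos, h]

lemma pvInsertSorted_perm (pq : List (Int × Int)) (item : Int × Int) :
    (pvInsertSorted pq item).Perm (item :: pq) := by
  induction pq with
  | nil => simp [pvInsertSorted, pvInsPos]
  | cons x rest ih =>
    rw [pvInsertSorted_cons]
    by_cases h : pvPairLtb x item = true
    · simp only [h, if_pos]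
      exact (ih.cons x).trans (List.Perm.swap _ _ _)
    · simp [h]

lemma pvPairLtb_total {a b : Int × Int} (h1 : pvPairLtb a b = false) (h2 : a.2 ≠ b.2) :
    pvPairLtb b a = true := by
  simp [pvPairLtb] at *
  omega

lemma pvInsertSorted_pairwise (pq : List (Int × Int)) (item : Int × Int)
    (hs : pq.Pairwise (fun a b => pvPairLtb a b = true))
    (hne : ∀ x ∈ pq, x.2 ≠ item.2) :
    (pvInsertSorted pq item).Pairwise (fun a b => pvPairLtb a b = true) := by
  induction pq with
  | nil => simp [pvInsertSorted, pvInsPos]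
  | cons x rest ih =>
    rw [pvInsertSorted_cons]
    rcases List.pairwise_cons.mp hs with ⟨hx, hrest⟩
    by_cases h : pvPairLtb x item = true
    · simp only [h, if_pos]
      refine List.pairwise_cons.mpr ⟨?_, ih hrest (fun y hy => hne y (List.mem_cons_of_mem _ hy))⟩
      intro y hy
      have := (pvInsertSorted_perm rest item).mem_iff.mp hy
      cases this with
      | head => exact h
      | tail _ h1 => exact hx y h1
    · rw [if_neg h]
      have hxa : pvPairLtb item x = true :=
        pvPairLtb_total (a := x) (b := item) (by simpa using h)
          (fun hh => hne x List.mem_cons_self hh)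
      refine List.pairwise_cons.mpr ⟨?_, hs⟩
      intro y hy
      rcases List.mem_cons.mp hy with h' | h'
      · subst h'; exact hxa
      · -- item < x < y
        have hxy := hx y h'
        simp only [pvPairLtb, Bool.or_eq_true, decide_eq_true_eq, Bool.and_eq_true, beq_iff_eq] at *
        omega

lemma pvFind_first (xs : List (Int × Int)) (i c : Int)
    (hkeys : (xs.map Prod.fst).Pairwise (· < ·))
    (hmem : (i, c) ∈ xs)
    (hmin : ∀ kv ∈ xs, kv.2 = c → i ≤ kv.1) :
    xs.find? (fun kv => c == kv.2) = some (i, c) := by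
  induction xs with
  | nil => simp at hmem
  | cons kv rest ih =>
    rcases kv with ⟨j, v⟩
    rw [List.map_cons, List.pairwise_cons] at hkeys
    by_cases hv : v = c
    · subst hv
      have hij : i = j := by
        rcases List.mem_cons.mp hmem with h' | h'
        · exact congrArg Prod.fst h'
        · have h1 : j < i := hkeys.1 i (List.mem_map.mpr ⟨(i, v), h', rfl⟩)
          have h2 := hmin (j, v) List.mem_cons_self rfl
          omega
      subst hij
      simp [List.find?]
    · have hcv : (c == v) = false := by simpa using fun hh => hv hh.symm
      rw [List.find?_cons, hcv]
      apply ih hkeys.2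
      · rcases List.mem_cons.mp hmem with h' | h'
        · cases h'; simp at hv
        · exact h'
      · exact fun kv hkv h => hmin kv (List.mem_cons_of_mem _ hkv) h

-- the step lemma: one loop iteration preserves the invariant
lemma pvStep_inv (stA : List (List Int) × PySem.Dict Int Int × Int)
    (stB : List (List Int) × List (Int × Int)) (e : Int)
    (h : pvInv stA stB) : pvInv (pvStepA stA e) (pvStepB stB e) := by
  obtain ⟨resA, sums, c⟩ := stA
  obtain ⟨resB, pq⟩ := stB
  obtain ⟨hres, hkeys, hnil, hperm, hsort, hlow, hex⟩ := h
  simp only [pvInv] at *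
  match hpq : pq with
  | [] =>
    exact absurd (List.map_eq_nil_iff.mp hperm.symm.eq_nil) hnil
  | (s, i) :: rest =>
    have hnodup : (sums.items.map Prod.fst).Nodup := hkeys.nodup
    -- (i, s) ∈ items
    have hsi : (i, s) ∈ sums.items := by
      have : ((s, i) : Int × Int) ∈ sums.items.map (fun kv => (kv.2, kv.1)) :=
        hperm.mem_iff.mp List.mem_cons_self
      obtain ⟨kv, hkv, hkveq⟩ := List.mem_map.mp this
      obtain ⟨h1, h2⟩ := Prod.mk.injEq .. ▸ hkveq
      simpa [← h1, ← h2] using hkv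
    -- s = c
    have hsc : s = c := by
      have h1 : c ≤ s := hlow (i, s) hsi
      obtain ⟨kv0, hkv0, hkv0v⟩ := hex
      have : ((c, kv0.1) : Int × Int) ∈ (s, i) :: rest := by
        apply hperm.mem_iff.mpr
        exact List.mem_map.mpr ⟨kv0, hkv0, by rw [hkv0v]⟩
      rcases List.mem_cons.mp this with heq | hmr
      · have := congrArg Prod.fst heq; simp at this; omega
      · have := List.pairwise_cons.mp hsort |>.1 _ hmr
        simp only [pvPairLtb, Bool.or_eq_true, decide_eq_true_eq, Bool.and_eq_true, beq_iff_eq] at this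
        omega
    subst hsc
    -- the dict entry found by A's inner loop
    have hfind : sums.items.find? (fun kv => s == kv.2) = some (i, s) := by
      apply pvFind_first _ _ _ hkeys hsi
      intro kv hkv hkvv
      have : ((s, kv.1) : Int × Int) ∈ (s, i) :: rest := by
        apply hperm.mem_iff.mpr
        exact List.mem_map.mpr ⟨kv, hkv, by rw [hkvv]⟩
      rcases List.mem_cons.mp this with heq | hmr
      · have := congrArg Prod.snd heq; simp at this; omega
      · have := List.pairwise_cons.mp hsort |>.1 _ hmr
        simp only [pvPairLtb, Bool.or_eq_true, decide_eq_true_eq, Bool.and_eq_true, beq_iff_eq] at this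
        omega
    -- indices in pq are the dict keys, hence i does not occur in rest
    have hsnd : (((s, i) :: rest).map Prod.snd).Perm (sums.items.map Prod.fst) := by
      have := hperm.map Prod.snd
      simpa [List.map_map, Function.comp] using this
    have hinotin : ∀ x ∈ rest, x.2 ≠ i := by
      have hnd : (((s, i) :: rest).map Prod.snd).Nodup := (hsnd.nodup_iff).mpr hnodup
      simp only [List.map_cons, List.nodup_cons] at hnd
      intro x hx hxe
      exact hnd.1 (List.mem_map.mpr ⟨x, hx, hxe⟩)
    -- decompose the dict items around the key i
    obtain ⟨u, w, huw⟩ := List.append_of_mem hsi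
    have hkeyuw : i ∉ (u.map Prod.fst) ∧ i ∉ (w.map Prod.fst) := by
      have h2 := hnodup
      rw [huw] at h2
      simp only [List.map_append, List.map_cons, List.nodup_append, List.nodup_cons] at h2
      obtain ⟨h1, ⟨h2', h3⟩, h4⟩ := h2
      exact ⟨fun hm => h4 i hm i List.mem_cons_self rfl, h2'⟩
    have hkeyu : ∀ p ∈ u, p.1 ≠ i := fun p hp hpe => hkeyuw.1 (List.mem_map.mpr ⟨p, hp, hpe⟩)
    have hkeyw : ∀ p ∈ w, p.1 ≠ i := fun p hp hpe => hkeyuw.2 (List.mem_map.mpr ⟨p, hp, hpe⟩)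
    -- the modified dict's items
    have hkeysnd : sums.keys.Nodup := by
      simp only [PySem.Dict.keys]; exact hnodup
    have hcont : sums.contains i = true :=
      (PySem.Dict.contains_iff_mem_keys sums i).mpr
        (by simp only [PySem.Dict.keys]; exact List.mem_map.mpr ⟨(i, s), hsi, rfl⟩)
    have hgetD : sums.getD i 0 = s := PySem.Dict.getD_of_mem_items sums hsi hkeysnd 0
    have hitems' : (sums.modify i 0 (· + e)).items = u ++ (i, s + e) :: w := by
      show (sums.insert i (sums.getD i 0 + e)).items = _
      rw [PySem.Dict.items_insert_of_contains sums _ hcont, hgetD, huw]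
      rw [List.map_append, List.map_cons]
      congr 1
      · apply (List.map_congr_left _).trans (List.map_id u)
        intro p hp
        simp [hkeyu p hp]
      · congr 1
        · simp
        · apply (List.map_congr_left _).trans (List.map_id w)
          intro p hp
          simp [hkeyw p hp]
    -- keys are unchanged
    have hkeys' : (sums.modify i 0 (· + e)).items.map Prod.fst = sums.items.map Prod.fst := by
      rw [hitems', huw]; simp
    -- permutation bookkeeping
    have hrest : rest.Perm ((u ++ w).map (fun kv => (kv.2, kv.1))) := by
      apply List.Perm.cons_inv (a := ((s, i) : Int × Int))
      apply hperm.trans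
      rw [huw]
      simp only [List.map_append, List.map_cons]
      exact List.perm_middle.trans (by simp)
    -- now discharge the step
    simp only [pvStepA, pvStepB, hfind, hitems']
    refine ⟨by rw [hres], ?_, by simp, ?_, ?_, ?_, ?_⟩
    · rw [show (u ++ (i, s + e) :: w).map Prod.fst = sums.items.map Prod.fst from hitems' ▸ hkeys']
      exact hkeys
    · -- pq' is a permutation of the swapped items'
      apply (pvInsertSorted_perm rest (s + e, i)).trans
      simp only [List.map_append, List.map_cons]
      refine List.Perm.trans ?_ List.perm_middle.symm
      exact (hrest.cons _).trans (by simp [List.map_append])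
    · exact pvInsertSorted_pairwise rest (s + e, i) (List.pairwise_cons.mp hsort).2 hinotin
    · -- c' is a lower bound of the new values
      intro kv hkv
      rcases hm : PySem.List.min? (sums.modify i 0 (· + e)).values (fun x => x) with _ | m
      · rw [PySem.List.min?_eq_none_iff] at hm
        simp only [PySem.Dict.values, hitems'] at hm
        simp at hm
      · exact PySem.List.min?_isMin hm kv.2
          (by simp only [PySem.Dict.values, hitems']; exact List.mem_map.mpr ⟨kv, hkv, rfl⟩)
    · -- c' is attained
      rcases hm : PySem.List.min? (sums.modify i 0 (· + e)).values (fun x => x) with _ | m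
      · rw [PySem.List.min?_eq_none_iff] at hm
        simp only [PySem.Dict.values, hitems'] at hm
        simp at hm
      · have := PySem.List.min?_mem hm
        simp only [PySem.Dict.values, hitems'] at this
        obtain ⟨kv, hkv, hkveq⟩ := List.mem_map.mp this
        exact ⟨kv, hitems' ▸ hkv, by simp [hkveq]⟩

lemma pvFoldl_inv (l : List Int) (stA : List (List Int) × PySem.Dict Int Int × Int)
    (stB : List (List Int) × List (Int × Int)) (h : pvInv stA stB) :
    pvInv (l.foldl pvStepA stA) (l.foldl pvStepB stB) := by
  induction l generalizing stA stB with
  | nil => exact h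
  | cons e t ih => exact ih _ _ (pvStep_inv _ _ e h)

lemma pvInit_inv (n : Int) (hn : 1 ≤ n) :
    pvInv ((PySem.List.pyRange 0 n 1).map (fun _ => ([] : List Int)),
           (PySem.List.pyRange 0 n 1).foldl (fun d i => d.insert i 0) PySem.Dict.empty, 0)
          ((PySem.List.pyRange 0 n 1).map (fun _ => ([] : List Int)),
           (PySem.List.pyRange 0 n 1).map (fun i => ((0 : Int), i))) := by
  have hitems : ((PySem.List.pyRange 0 n 1).foldl (fun d i => d.insert i 0) PySem.Dict.empty).items
      = (PySem.List.pyRange 0 n 1).map (fun a => (a, (0 : Int))) := by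
    have := PySem.Dict.items_foldl_insert_fresh (PySem.List.pyRange 0 n 1) (fun a => a)
      (fun _ => (0 : Int)) PySem.Dict.empty
      (fun a _ => PySem.Dict.contains_empty a) (by simpa using PySem.List.nodup_pyRange_one 0 n)
    simpa using this
  have hrange : PySem.List.pyRange 0 n 1 ≠ [] := by
    intro hcon
    have := congrArg List.length hcon
    rw [PySem.List.length_pyRange_one] at this
    simp at this
    omega
  refine ⟨rfl, ?_, ?_, ?_, ?_, ?_, ?_⟩
  · rw [hitems, List.map_map]
    have hcompid : (Prod.fst ∘ fun a : Int => (a, (0 : Int))) = id := rfl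
    rw [hcompid, List.map_id]
    exact PySem.List.pairwise_lt_pyRange_one 0 n
  · rw [hitems]
    simpa using hrange
  · rw [hitems, List.map_map]
    exact List.Perm.refl _
  · exact (PySem.List.pairwise_lt_pyRange_one 0 n).map _
      (fun a b hab => by simp [pvPairLtb, hab])
  · intro kv hkv
    rw [hitems] at hkv
    obtain ⟨a, _, rfl⟩ := List.mem_map.mp hkv
    simp
  · obtain ⟨x, hx⟩ := List.exists_mem_of_ne_nil _ hrange
    exact ⟨(x, 0), by rw [hitems]; exact List.mem_map.mpr ⟨x, hx, rfl⟩, rfl⟩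

-- A's final index loop 'for i in range(len(r)): r[i].sort()' maps g over the list
lemma pvFoldl_sortEach (g : List Int → List Int) :
    ∀ (zs ys : List (List Int)),
    (PySem.List.pyRange (ys.length : Int) ((ys.length : Int) + (zs.length : Int)) 1).foldl
      (fun r i => r.set i.toNat (g (r.getD i.toNat []))) (ys ++ zs) = ys ++ zs.map g := by
  intro zs
  induction zs with
  | nil =>
    intro ys
    rw [PySem.List.pyRange_one_eq_nil (by simp)]
    simp
  | cons z zs ih =>
    intro ys
    rw [PySem.List.pyRange_one_cons (by simp only [List.length_cons]; push_cast; omega)]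
    rw [List.foldl_cons]
    have hset : (ys ++ z :: zs).set ((ys.length : Int)).toNat
        (g ((ys ++ z :: zs).getD ((ys.length : Int)).toNat [])) = (ys ++ [g z]) ++ zs := by
      have htn : ((ys.length : Int)).toNat = ys.length := by simp
      rw [htn]
      have hget : (ys ++ z :: zs).getD ys.length [] = z := by
        rw [List.getD_eq_getElem?_getD, List.getElem?_append_right (Nat.le_refl _)]
        simp
      rw [hget, List.set_append, if_neg (by omega)]
      simp
    rw [hset]
    have hlen : ((ys ++ [g z]).length : Int) = (ys.length : Int) + 1 := by simp
    have := ih (ys ++ [g z])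
    rw [hlen] at this
    have harith : (ys.length : Int) + 1 + (zs.length : Int) = (ys.length : Int) + ((z :: zs).length : Int) := by
      simp; omega
    rw [harith] at this
    rw [this]
    simp

-- ===== VERDICT (by name: the statement is the Claim_ definition above) =====
theorem split_chunks_bad_spec : Claim_equal_split_chunks_bad := by
  intro l n _ hpre
  unfold Spec_split_chunks_bad split_chunks_bad split_chunks_bad_alt
  have hres : (l.foldl pvStepA ((PySem.List.pyRange 0 n 1).map (fun _ => ([] : List Int)),
      (PySem.List.pyRange 0 n 1).foldl (fun d i => d.insert i 0) PySem.Dict.empty, 0)).1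
      = (l.foldl pvStepB ((PySem.List.pyRange 0 n 1).map (fun _ => ([] : List Int)),
      (PySem.List.pyRange 0 n 1).map (fun i => ((0 : Int), i)))).1 := by
    rcases hpre with rfl | hn
    · rfl
    · exact (pvFoldl_inv l _ _ (pvInit_inv n hn)).1
  simp only
  rw [hres]
  have := pvFoldl_sortEach (fun b => PySem.List.sorted b (fun x => x) false)
    ((l.foldl pvStepB ((PySem.List.pyRange 0 n 1).map (fun _ => ([] : List Int)),
      (PySem.List.pyRange 0 n 1).map (fun i => ((0 : Int), i)))).1) []
  simpa using this
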